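-- pv_equiv track=rewrite | github.com/hnnsb/AdventOfCode2023 | 14/14.py | roll_EW
-- ===== SOURCE A (Python) =====
-- from typing import Literal
--
-- def roll_EW(field, dir:Literal["E", "W"]):
--     if dir =="E":
--         field = [row[::-1] for row in field]
--     for r in range(len(field)):
--         for c in range(len(field[0])):
--             if field[r][c] != 'O':
--                 continue
--
--             dc = 1
--             moved = False
--             while c - dc >= 0 and field[r][c-dc] == '.':
--                 dc += 1
--                 moved = True
--             if moved:
--                 field[r][c] = '.'
--                 field[r][c-dc+1] = 'O'
--     return [row[::-1] for row in field] if dir == "E" else field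
-- ===== SOURCE B (Python) =====
-- # Single pass per row: a pending-free-space counter flushed at walls replaces A's per-rock leftward scans.
-- # Return-value equivalence only: A mutates `field`'s rows in place for dir != "E"; B builds new lists.
--
-- def _roll_row_west(row):
--     out = []
--     dots = 0
--     for ch in row:
--         if ch == 'O':
--             out.append('O')          # a round rock rolls past all pending dots
--         elif ch == '.':
--             dots += 1                # remember free space
--         else:
--             out.extend(['.'] * dots) # a wall: settle the pending free space, then the wall
--             out.append(ch)
--             dots = 0
--     out.extend(['.'] * dots)
--     return out
--
-- def roll_EW(field, dir):
--     if dir == "E":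
--         return [_roll_row_west(row[::-1])[::-1] for row in field]
--     return [_roll_row_west(row) for row in field]
-- ===== Notes on version B (the rewrite author's own statement) =====
-- stated objective: alternative
-- what changed: Replaces A's per-rock leftward while-scan with in-place index writes by a single left-to-right pass per row that emits rocks immediately and flushes a pending free-space counter at each wall.
-- outside the precondition, e.g. on roll_EW([['O'], ['.', 'O']], 'W'): A returns [['O'], ['.', 'O']], B returns [['O'], ['O', '.']]
import Mathlib
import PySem

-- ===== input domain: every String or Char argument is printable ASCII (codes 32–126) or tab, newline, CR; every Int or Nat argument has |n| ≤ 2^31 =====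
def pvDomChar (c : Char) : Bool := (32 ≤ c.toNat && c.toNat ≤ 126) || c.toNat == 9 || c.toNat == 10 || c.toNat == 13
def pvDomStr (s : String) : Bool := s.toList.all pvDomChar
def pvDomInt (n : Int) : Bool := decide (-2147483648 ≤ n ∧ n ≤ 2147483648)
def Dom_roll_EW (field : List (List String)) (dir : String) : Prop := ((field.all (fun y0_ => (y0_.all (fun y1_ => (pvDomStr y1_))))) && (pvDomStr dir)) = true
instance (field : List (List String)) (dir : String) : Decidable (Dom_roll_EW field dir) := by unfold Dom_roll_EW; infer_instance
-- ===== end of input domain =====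

-- B replaces A's per-rock leftward while-scans by a single pass per row with a pending-free-space counter;
-- return-value equivalence only: A mutates `field`'s rows in place when dir ≠ "E", B builds fresh lists.

-- ===== PORT A =====
-- dc-loop of A: number of consecutive "." cells scanning down from index j (stops at index 0)
def pvDcount (row : List String) : Nat → Nat
  | 0 => if row.getD 0 "" = "." then 1 else 0
  | j+1 => if row.getD (j+1) "" = "." then pvDcount row j + 1 else 0

-- body of A's inner loop for one cell c of one row
def pvStepCell (row : List String) (c : Nat) : List String :=
  if row.getD c "" ≠ "O" then row
  else
    let dots := if c = 0 then 0 else pvDcount row (c-1)   -- dots = dc - 1; moved ↔ 0 < dots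
    if 0 < dots then (row.set c ".").set (c - dots) "O" else row

def pvStepField (f : List (List String)) (r c : Nat) : List (List String) :=
  f.set r (pvStepCell (f.getD r []) c)

-- one iteration of A's outer loop: `for c in range(len(field[0]))`
def pvRowPass (f : List (List String)) (r : Nat) : List (List String) :=
  (List.range ((f.headD []).length)).foldl (fun g c => pvStepField g r c) f

def roll_EW (field : List (List String)) (dir : String) : List (List String) :=
  let f0 := if dir = "E" then field.map (fun row => (PySem.List.slice? row none none (-1)).getD []) else field
  let f1 := (List.range f0.length).foldl pvRowPass f0
  if dir = "E" then f1.map (fun row => (PySem.List.slice? row none none (-1)).getD []) else f1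

-- ===== PORT B =====
def pvBStep (s : List String × Nat) (ch : String) : List String × Nat :=
  if ch = "O" then (s.1 ++ ["O"], s.2)
  else if ch = "." then (s.1, s.2 + 1)
  else (s.1 ++ List.replicate s.2 "." ++ [ch], 0)

def pvRollRowWest (row : List String) : List String :=
  let s := row.foldl pvBStep ([], 0)
  s.1 ++ List.replicate s.2 "."

def roll_EW_alt (field : List (List String)) (dir : String) : List (List String) :=
  if dir = "E" then field.map (fun row => (pvRollRowWest row.reverse).reverse)
  else field.map pvRollRowWest

-- ===== PRECONDITION & SPEC =====
-- Pre_ excludes grids with a row shorter than the first row (A raises IndexError there) and ragged grids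
-- carrying a round rock "O" in cells A never visits (beyond column len(field[0]) rolling west, before the
-- last len(field[0]) columns rolling east): there A returns the grid with those rocks left unrolled.
def Pre_roll_EW (field : List (List String)) (dir : String) : Prop :=
  ∀ row ∈ field, (field.headD []).length ≤ row.length ∧
    ∀ c ∈ (if dir = "E" then row.take (row.length - (field.headD []).length)
           else row.drop ((field.headD []).length)), c ≠ "O"
instance (field : List (List String)) (dir : String) : Decidable (Pre_roll_EW field dir) := by
  unfold Pre_roll_EW; infer_instance
def pvWitness_roll_EW : List (List String) × String := ([["O", ".", "#", "."], [".", ".", "O", "O"]], "E")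

def Spec_roll_EW (field : List (List String)) (dir : String) (out : List (List String)) : Prop := out = roll_EW_alt field dir
instance (field : List (List String)) (dir : String) (out : List (List String)) : Decidable (Spec_roll_EW field dir out) := by unfold Spec_roll_EW; infer_instance

-- ===== CLAIM (what is proved, stated in full; the proofs are below) =====
def Claim_equal_roll_EW : Prop := ∀ (field : List (List String)) (dir : String), Dom_roll_EW field dir → Pre_roll_EW field dir → Spec_roll_EW field dir (roll_EW field dir)

-- ===== LEMMAS AND PROOFS =====

lemma pvDcount_ne (s : List String) (j : Nat) (h : s.getD j "" ≠ ".") : pvDcount s j = 0 := by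
  cases j <;> simp only [pvDcount, if_neg h]

lemma pvDcount_run (s : List String) (b : Nat)
    (h0 : b = 0 ∨ s.getD (b-1) "" ≠ ".") :
    ∀ d, 1 ≤ d → (∀ k, k < d → s.getD (b+k) "" = ".") → pvDcount s (b + d - 1) = d := by
  intro d
  induction d with
  | zero => omega
  | succ d ihd =>
    intro _ hdot
    rcases Nat.eq_zero_or_pos d with hd0 | hd1
    · subst hd0
      have hb : s.getD (b + 0) "" = "." := hdot 0 (by omega)
      cases b with
      | zero =>
        show pvDcount s 0 = 1
        simp only [pvDcount]
        rw [if_pos (by simpa using hb)]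
      | succ j =>
        have hj : s.getD j "" ≠ "." := by simpa using h0
        show pvDcount s (j + 1) = 1
        simp only [pvDcount]
        rw [if_pos (by simpa using hb), pvDcount_ne s j hj]
    · have ih := ihd hd1 (fun k hk => hdot k (by omega))
      have hbd : b + (d + 1) - 1 = (b + d - 1) + 1 := by omega
      rw [hbd]
      simp only [pvDcount]
      rw [show b + d - 1 + 1 = b + d from by omega, if_pos (hdot d (by omega)), ih]

lemma pvBfold_len (l : List String) : ∀ out dots,
    ((l.foldl pvBStep (out, dots)).1).length + (l.foldl pvBStep (out, dots)).2
      = out.length + dots + l.length := by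
  induction l with
  | nil => intro out dots; simp
  | cons ch rest ih =>
    intro out dots
    simp only [List.foldl_cons, pvBStep]
    by_cases h1 : ch = "O"
    · rw [if_pos h1]; have := ih (out ++ ["O"]) dots; simp at this ⊢; omega
    · rw [if_neg h1]
      by_cases h2 : ch = "."
      · rw [if_pos h2]; have := ih out (dots + 1); simp at this ⊢; omega
      · rw [if_neg h2]
        have := ih (out ++ List.replicate dots "." ++ [ch]) 0
        simp at this ⊢; omega

lemma pvLastOk (l : List String) (x : String) (hx : x ≠ ".") :
    (l ++ [x]).getD ((l ++ [x]).length - 1) "" ≠ "." := by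
  rw [List.getD_append_right _ _ _ _ (by simp)]
  simp [hx]

lemma pvSetMid (out X : List String) (k : Nat) (x : String) :
    (out ++ X).set (out.length + k) x = out ++ X.set k x := by
  rw [List.set_append, if_neg (by omega), show out.length + k - out.length = k from by omega]

lemma pvRepShift (d : Nat) (h : 1 ≤ d) (l : List String) :
    List.replicate (d - 1) "." ++ "." :: l = List.replicate d "." ++ l := by
  obtain ⟨d', rfl⟩ : ∃ d', d = d' + 1 := ⟨d - 1, by omega⟩
  simp [List.replicate_succ']

lemma pvMain (suf : List String) : ∀ (tail out : List String) (dots : Nat),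
    (out = [] ∨ out.getD (out.length - 1) "" ≠ ".") →
    (List.range' (out.length + dots) suf.length 1).foldl pvStepCell
        (out ++ (List.replicate dots "." ++ (suf ++ tail)))
      = (suf.foldl pvBStep (out, dots)).1
          ++ (List.replicate (suf.foldl pvBStep (out, dots)).2 "." ++ tail) := by
  induction suf with
  | nil => intro tail out dots _; simp
  | cons ch rest ih =>
    intro tail out dots hlast
    have hgc : (out ++ (List.replicate dots "." ++ ch :: (rest ++ tail))).getD (out.length + dots) "" = ch := by
      rw [List.getD_append_right _ _ _ _ (by omega),
          show out.length + dots - out.length = dots from by omega,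
          List.getD_append_right _ _ _ _ (by simp)]
      simp
    have h0 : out.length = 0 ∨
        (out ++ (List.replicate dots "." ++ ch :: (rest ++ tail))).getD (out.length - 1) "" ≠ "." := by
      by_cases hl0 : out.length = 0
      · exact Or.inl hl0
      · refine Or.inr ?_
        rw [List.getD_append _ _ _ _ (by omega)]
        rcases hlast with h | h
        · exact absurd (by simp [h]) hl0
        · exact h
    simp only [List.length_cons, List.range'_succ, List.foldl_cons, List.cons_append]
    by_cases hO : ch = "O"
    · subst hO
      have hbs : pvBStep (out, dots) "O" = (out ++ ["O"], dots) := by simp [pvBStep]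
      rw [hbs]
      by_cases hd : dots = 0
      · subst hd
        have hstep : pvStepCell (out ++ (List.replicate 0 "." ++ "O" :: (rest ++ tail))) (out.length + 0)
            = out ++ (List.replicate 0 "." ++ "O" :: (rest ++ tail)) := by
          simp only [pvStepCell]
          rw [if_neg (by rw [hgc]; simp)]
          have hz : (if out.length + 0 = 0 then 0
              else pvDcount (out ++ (List.replicate 0 "." ++ "O" :: (rest ++ tail))) (out.length + 0 - 1)) = 0 := by
            by_cases hc : out.length + 0 = 0
            · rw [if_pos hc]
            · rw [if_neg hc]
              apply pvDcount_ne
              rw [show out.length + 0 - 1 = out.length - 1 from by omega]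
              rcases h0 with h | h
              · omega
              · exact h
          rw [hz]
          simp
        rw [hstep,
            show out ++ (List.replicate 0 "." ++ "O" :: (rest ++ tail))
              = (out ++ ["O"]) ++ (List.replicate 0 "." ++ (rest ++ tail)) from by simp,
            show out.length + 0 + 1 = (out ++ ["O"]).length + 0 from by simp]
        exact ih tail (out ++ ["O"]) 0 (Or.inr (pvLastOk out "O" (by decide)))
      · have h1 : 1 ≤ dots := by omega
        have hdotk : ∀ k, k < dots →
            (out ++ (List.replicate dots "." ++ "O" :: (rest ++ tail))).getD (out.length + k) "" = "." := by
          intro k hk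
          rw [List.getD_append_right _ _ _ _ (by omega),
              show out.length + k - out.length = k from by omega,
              List.getD_append _ _ _ _ (by simpa using hk)]
          simp [List.getD, hk]
        have hrun := pvDcount_run (out ++ (List.replicate dots "." ++ "O" :: (rest ++ tail))) out.length h0 dots h1 hdotk
        have hstep : pvStepCell (out ++ (List.replicate dots "." ++ "O" :: (rest ++ tail))) (out.length + dots)
            = (out ++ ["O"]) ++ (List.replicate dots "." ++ (rest ++ tail)) := by
          simp only [pvStepCell]
          rw [if_neg (by rw [hgc]; simp)]
          rw [if_neg (show ¬(out.length + dots = 0) from by omega), hrun, if_pos (show 0 < dots from by omega)]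
          rw [pvSetMid out _ dots "."]
          rw [show (List.replicate dots "." ++ "O" :: (rest ++ tail)).set dots "."
                = List.replicate dots "." ++ "." :: (rest ++ tail) from by
              rw [List.set_append, if_neg (by simp)]; simp]
          rw [show out.length + dots - dots = out.length + 0 from by omega]
          rw [pvSetMid out _ 0 "O"]
          rw [show (List.replicate dots "." ++ "." :: (rest ++ tail)).set 0 "O"
                = "O" :: (List.replicate (dots - 1) "." ++ "." :: (rest ++ tail)) from by
              obtain ⟨d', rfl⟩ : ∃ d', dots = d' + 1 := ⟨dots - 1, by omega⟩
              simp [List.replicate_succ]]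
          rw [pvRepShift dots h1 (rest ++ tail)]
          simp
        rw [hstep,
            show out.length + dots + 1 = (out ++ ["O"]).length + dots from by (simp; omega)]
        exact ih tail (out ++ ["O"]) dots (Or.inr (pvLastOk out "O" (by decide)))
    · have hstep : pvStepCell (out ++ (List.replicate dots "." ++ ch :: (rest ++ tail))) (out.length + dots)
          = out ++ (List.replicate dots "." ++ ch :: (rest ++ tail)) := by
        simp only [pvStepCell]
        rw [if_pos (by rw [hgc]; exact hO)]
      rw [hstep]
      by_cases hP : ch = "."
      · subst hP
        have hbs : pvBStep (out, dots) "." = (out, dots + 1) := by simp [pvBStep]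
        rw [hbs,
            show out ++ (List.replicate dots "." ++ "." :: (rest ++ tail))
              = out ++ (List.replicate (dots + 1) "." ++ (rest ++ tail)) from by
            rw [List.replicate_succ']; simp,
            show out.length + dots + 1 = out.length + (dots + 1) from by omega]
        exact ih tail out (dots + 1) hlast
      · have hbs : pvBStep (out, dots) ch = (out ++ List.replicate dots "." ++ [ch], 0) := by
          simp [pvBStep, hO, hP]
        rw [hbs,
            show out ++ (List.replicate dots "." ++ ch :: (rest ++ tail))
              = (out ++ List.replicate dots "." ++ [ch]) ++ (List.replicate 0 "." ++ (rest ++ tail)) from by simp,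
            show out.length + dots + 1 = (out ++ List.replicate dots "." ++ [ch]).length + 0 from by (simp; omega)]
        exact ih tail (out ++ List.replicate dots "." ++ [ch]) 0
          (Or.inr (by
            rw [show out ++ List.replicate dots "." ++ [ch]
                  = (out ++ List.replicate dots ".") ++ [ch] from by simp]
            exact pvLastOk _ _ hP))

lemma pvTailInert (tail : List String) : ∀ (out : List String) (dots : Nat),
    (∀ c ∈ tail, c ≠ "O") →
    (tail.foldl pvBStep (out, dots)).1 ++ List.replicate (tail.foldl pvBStep (out, dots)).2 "."
      = out ++ (List.replicate dots "." ++ tail) := by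
  induction tail with
  | nil => intro out dots _; simp
  | cons ch rest ih =>
    intro out dots hno
    have hch : ch ≠ "O" := hno ch List.mem_cons_self
    have hrest : ∀ c ∈ rest, c ≠ "O" := fun c hc => hno c (List.mem_cons_of_mem _ hc)
    simp only [List.foldl_cons]
    by_cases hP : ch = "."
    · subst hP
      rw [show pvBStep (out, dots) "." = (out, dots + 1) from by simp [pvBStep]]
      rw [ih out (dots + 1) hrest, List.replicate_succ']
      simp
    · rw [show pvBStep (out, dots) ch = (out ++ List.replicate dots "." ++ [ch], 0) from by
          simp [pvBStep, hch, hP]]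
      rw [ih _ 0 hrest]
      simp

lemma pvRollRowWest_len (row : List String) : (pvRollRowWest row).length = row.length := by
  have := pvBfold_len row [] 0
  simp only [pvRollRowWest, List.length_append, List.length_replicate]
  simp at this; omega

lemma pvRowA_eq (row : List String) (w : Nat) (hlen : w ≤ row.length)
    (htail : ∀ c ∈ row.drop w, c ≠ "O") :
    (List.range w).foldl pvStepCell row = pvRollRowWest row := by
  have hlen' : (row.take w).length = w := by simp [hlen]
  have h1 := pvMain (row.take w) (row.drop w) [] 0 (Or.inl rfl)
  rw [hlen'] at h1
  simp only [List.nil_append, List.length_nil, Nat.zero_add, List.replicate_zero,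
    List.take_append_drop] at h1
  rw [List.range_eq_range', h1]
  simp only [pvRollRowWest]
  conv_rhs => rw [← List.take_append_drop w row]
  rw [List.foldl_append]
  exact (pvTailInert (row.drop w) ((row.take w).foldl pvBStep ([], 0)).1
    ((row.take w).foldl pvBStep ([], 0)).2 htail).symm

lemma pvFold_set (r : Nat) (l : List Nat) : ∀ (f : List (List String)), r < f.length →
    l.foldl (fun g c => pvStepField g r c) f
      = f.set r (l.foldl pvStepCell (f.getD r [])) := by
  induction l with
  | nil =>
    intro f hr
    simp [List.getD, List.getElem?_eq_getElem hr, List.set_getElem_self]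
  | cons c rest ih =>
    intro f hr
    simp only [List.foldl_cons]
    rw [show pvStepField f r c = f.set r (pvStepCell (f.getD r []) c) from rfl]
    rw [ih _ (by simpa using hr)]
    rw [List.set_set]
    congr 1
    simp [List.getD, hr]

lemma pvOuterAux (field : List (List String)) (w : Nat)
    (hw : ∀ row ∈ field, w ≤ row.length ∧ ∀ c ∈ row.drop w, c ≠ "O")
    (hw0 : (field.headD []).length = w) :
    ∀ n, n ≤ field.length →
      (List.range n).foldl pvRowPass field
        = (field.take n).map pvRollRowWest ++ field.drop n := by
  intro n
  induction n with
  | zero => intro _; simp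
  | succ n ihn =>
    intro hn
    have hlt : n < field.length := by omega
    rw [List.range_succ, List.foldl_append, ihn (by omega)]
    have hmlen : ((field.take n).map pvRollRowWest).length = n := by
      simp [List.length_take]; omega
    have hget : ((field.take n).map pvRollRowWest ++ field.drop n).getD n [] = field[n] := by
      rw [List.getD_append_right _ _ _ _ (by omega), show n - ((field.take n).map pvRollRowWest).length = 0 from by omega]
      rw [List.drop_eq_getElem_cons hlt]
      simp [List.getD, List.getElem?_eq_getElem hlt]
    obtain ⟨hlenn, htailn⟩ := hw field[n] (List.getElem_mem hlt)
    have hhead : ((((field.take n).map pvRollRowWest ++ field.drop n)).headD []).length = w := by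
      cases field with
      | nil => simp at hlt
      | cons r0 tl =>
        have hr0 : r0.length = w := by simpa using hw0
        cases n with
        | zero => simpa using hr0
        | succ m => simp [List.take_succ_cons, pvRollRowWest_len, hr0]
    simp only [List.foldl_cons, List.foldl_nil, pvRowPass]
    rw [pvFold_set n _ _ (by simp [List.length_take]; omega)]
    rw [hget, hhead, pvRowA_eq field[n] w hlenn htailn]
    rw [List.set_append, if_neg (by omega),
        show n - ((field.take n).map pvRollRowWest).length = 0 from by omega]
    rw [List.drop_eq_getElem_cons hlt]
    rw [show (field[n] :: field.drop (n+1)).set 0 (pvRollRowWest field[n])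
          = pvRollRowWest field[n] :: field.drop (n+1) from rfl]
    rw [show field.take (n+1) = field.take n ++ [field[n]] from by
          rw [List.take_succ, List.getElem?_eq_getElem hlt]; simp]
    simp [List.map_append]
    rw [show List.take (n+1) (field.map pvRollRowWest)
          = List.take n (field.map pvRollRowWest) ++ [pvRollRowWest field[n]] from by
        rw [List.take_succ, List.getElem?_map, List.getElem?_eq_getElem hlt]; simp]
    simp

lemma pvOuter (field : List (List String)) (w : Nat)
    (hw : ∀ row ∈ field, w ≤ row.length ∧ ∀ c ∈ row.drop w, c ≠ "O")
    (hw0 : (field.headD []).length = w) :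
    (List.range field.length).foldl pvRowPass field = field.map pvRollRowWest := by
  have h := pvOuterAux field w hw hw0 field.length (le_refl _)
  simpa using h

-- ===== VERDICT (by name: the statement is the Claim_ definition above) =====
theorem roll_EW_spec : Claim_equal_roll_EW := by
  intro field dir _ hpre
  unfold Spec_roll_EW roll_EW roll_EW_alt
  by_cases hdir : dir = "E"
  · rw [if_pos hdir, if_pos hdir, if_pos hdir]
    simp only [PySem.List.slice?_none_none_neg_one, Option.getD_some]
    rw [pvOuter (field.map (fun row => row.reverse)) ((field.headD []).length)
          (by
            intro row hmem
            obtain ⟨r, hr, rfl⟩ := List.mem_map.1 hmem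
            obtain ⟨h1, h2⟩ := hpre r hr
            rw [if_pos hdir] at h2
            refine ⟨by simpa using h1, ?_⟩
            intro c hc
            rw [List.drop_reverse, List.mem_reverse] at hc
            exact h2 c hc)
          (by cases field <;> simp)]
    simp [List.map_map, Function.comp]
  · rw [if_neg hdir, if_neg hdir, if_neg hdir]
    refine pvOuter field ((field.headD []).length)
      (fun row hr => by
        obtain ⟨h1, h2⟩ := hpre row hr
        rw [if_neg hdir] at h2
        exact ⟨h1, h2⟩) rfl
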